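-- pv_equiv track=rewrite | github.com/Xiaoguo-Zheng/sgVariant-TDO-Toolkit | screening_code/sgRNA_amplicon_pipeline.py | merge_sgrna
-- ===== SOURCE A (Python) =====
-- def merge_sgrna(seq1, seq2):
--     """
--     Merge Forward and Reverse sgRNA sequences based on longest overlap.
--     If no overlap or single-sided, truncate to 39bp.
--     """
--     if seq1 == "-" and seq2 == "-": return "-"
--     if seq1 != "-" and seq2 == "-": return seq1[:39]
--     if seq1 == "-" and seq2 != "-": return seq2[:39]
--
--     longest_overlap = ""
--     start1, start2 = 0, 0
--     len1, len2 = len(seq1), len(seq2)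
--
--     # O(N^2) overlap search (fast enough for <50bp sequences)
--     for i in range(len1):
--         for j in range(len2):
--             k = 0
--             while (i + k < len1) and (j + k < len2) and (seq1[i+k] == seq2[j+k]):
--                 k += 1
--             if k > len(longest_overlap):
--                 longest_overlap = seq1[i:i+k]
--                 start1 = i
--                 start2 = j
--
--     if longest_overlap:
--         prefix = seq1[:start1]
--         suffix = seq2[start2 + len(longest_overlap):]
--         return prefix + longest_overlap + suffix
--     else:
--         return seq1[:39] # Fallback if absolutely no overlap is found
-- ===== SOURCE B (Python) =====
-- def merge_sgrna(seq1, seq2):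
--     """
--     Merge Forward and Reverse sgRNA sequences based on longest overlap.
--     If no overlap or single-sided, truncate to 39bp.
--     DP longest-common-substring: O(n1*n2) instead of A's O(n1*n2*k) scan.
--     """
--     if seq1 == "-" and seq2 == "-": return "-"
--     if seq2 == "-": return seq1[:39]
--     if seq1 == "-": return seq2[:39]
--
--     n1, n2 = len(seq1), len(seq2)
--     best_len = best1 = best2 = 0
--     # nxt[j] = length of longest common prefix of seq1[i+1:] and seq2[j:]
--     nxt = [0] * (n2 + 1)
--     # scan in reverse row-major order; '>=' makes the earliest (i, j) win ties,
--     # matching A's forward strict-'>' scan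
--     for i in range(n1 - 1, -1, -1):
--         cur = [0] * (n2 + 1)
--         for j in range(n2 - 1, -1, -1):
--             if seq1[i] == seq2[j]:
--                 k = nxt[j + 1] + 1
--                 cur[j] = k
--                 if k >= best_len:
--                     best_len, best1, best2 = k, i, j
--         nxt = cur
--
--     if best_len:
--         return seq1[:best1 + best_len] + seq2[best2 + best_len:]
--     return seq1[:39]
-- ===== Notes on version B (the rewrite author's own statement) =====
-- stated objective: faster
-- what changed: Replaced A's O(N^3) scan (for every cell (i,j) re-extend the match character by character) with an O(N^2) dynamic-programming table of common-prefix lengths, filled bottom-up one row at a time and scanned in reverse row-major order with a '>=' update so that A's earliest-maximum tie-break is preserved.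
import Mathlib
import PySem

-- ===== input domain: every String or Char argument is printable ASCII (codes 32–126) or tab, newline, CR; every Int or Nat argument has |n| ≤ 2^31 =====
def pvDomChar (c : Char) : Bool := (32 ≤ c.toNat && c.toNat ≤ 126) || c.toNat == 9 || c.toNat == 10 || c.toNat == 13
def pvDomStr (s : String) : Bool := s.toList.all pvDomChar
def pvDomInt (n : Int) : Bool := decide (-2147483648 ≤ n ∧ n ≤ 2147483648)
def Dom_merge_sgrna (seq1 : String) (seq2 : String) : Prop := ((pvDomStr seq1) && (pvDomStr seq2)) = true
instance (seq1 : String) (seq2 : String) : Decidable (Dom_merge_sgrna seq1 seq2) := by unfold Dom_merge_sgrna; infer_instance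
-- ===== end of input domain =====

-- B replaces A's cubic substring-extension scan by a quadratic DP over common-prefix rows (objective: faster).


-- ===== PORT A =====
-- the inner `while` loop of A: extend the match at (i+k, j+k) while in range and equal
def extLen (l1 l2 : List Char) (i j k : Nat) : Nat :=
  if h : i + k < l1.length ∧ j + k < l2.length ∧ l1.getD (i + k) ' ' = l2.getD (j + k) ' ' then
    extLen l1 l2 i j (k + 1)
  else k
termination_by l1.length - (i + k)
decreasing_by omega

def merge_sgrna (seq1 : String) (seq2 : String) : String :=
  if seq1 = "-" ∧ seq2 = "-" then "-"
  else if seq1 ≠ "-" ∧ seq2 = "-" then String.mk (seq1.toList.take 39)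
  else if seq1 = "-" ∧ seq2 ≠ "-" then String.mk (seq2.toList.take 39)
  else
    let l1 := seq1.toList
    let l2 := seq2.toList
    let st := (List.range l1.length).foldl (fun st i =>
        (List.range l2.length).foldl (fun st j =>
            let k := extLen l1 l2 i j 0
            if st.1.length < k then ((l1.drop i).take k, i, j) else st) st)
      (([] : List Char), 0, 0)
    if st.1 ≠ [] then
      String.mk (l1.take st.2.1 ++ st.1 ++ l2.drop (st.2.2 + st.1.length))
    else String.mk (l1.take 39)

-- ===== PORT B =====
def merge_sgrna_alt (seq1 : String) (seq2 : String) : String :=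
  if seq1 = "-" ∧ seq2 = "-" then "-"
  else if seq2 = "-" then String.mk (seq1.toList.take 39)
  else if seq1 = "-" then String.mk (seq2.toList.take 39)
  else
    let l1 := seq1.toList
    let l2 := seq2.toList
    let n2 := l2.length
    -- reverse row-major scan; nxt = DP row i+1, cur = DP row i; '≥' keeps the earliest (i,j)
    let st := (List.range l1.length).reverse.foldl (fun st i =>
        (List.range n2).reverse.foldl (fun st2 j =>
            if l1.getD i ' ' = l2.getD j ' ' then
              let k := st.2.getD (j + 1) 0 + 1
              ((if k ≥ st2.1.1 then (k, i, j) else st2.1), st2.2.set j k)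
            else st2)
          (st.1, List.replicate (n2 + 1) 0))
      (((0, 0, 0) : Nat × Nat × Nat), List.replicate (n2 + 1) 0)
    if st.1.1 ≠ 0 then
      String.mk (l1.take (st.1.2.1 + st.1.1) ++ l2.drop (st.1.2.2 + st.1.1))
    else String.mk (l1.take 39)

-- ===== PRECONDITION & SPEC =====
def Spec_merge_sgrna (seq1 : String) (seq2 : String) (out : String) : Prop := out = merge_sgrna_alt seq1 seq2
instance (seq1 : String) (seq2 : String) (out : String) : Decidable (Spec_merge_sgrna seq1 seq2 out) := by unfold Spec_merge_sgrna; infer_instance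

-- ===== CLAIM (what is proved, stated in full; the proofs are below) =====
def Claim_equal_merge_sgrna : Prop := ∀ (seq1 : String) (seq2 : String), Dom_merge_sgrna seq1 seq2 → Spec_merge_sgrna seq1 seq2 (merge_sgrna seq1 seq2)

-- ===== LEMMAS AND PROOFS =====

-- longest common prefix length of two lists
def lcp : List Char → List Char → Nat
  | a :: as, b :: bs => if a = b then lcp as bs + 1 else 0
  | _, _ => 0

-- the value both programs score cell (i, j) with
def vl (l1 l2 : List Char) (p : Nat × Nat) : Nat := lcp (l1.drop p.1) (l2.drop p.2)

-- A's update rule: first strict improvement wins (forward scan)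
def pvStepA (v : Nat × Nat → Nat) (s : Nat × Nat × Nat) (p : Nat × Nat) : Nat × Nat × Nat :=
  if s.1 < v p then (v p, p.1, p.2) else s

-- B's update rule: last '≥' improvement wins (backward scan), only positive values
def pvStepB (v : Nat × Nat → Nat) (s : Nat × Nat × Nat) (p : Nat × Nat) : Nat × Nat × Nat :=
  if 1 ≤ v p ∧ s.1 ≤ v p then (v p, p.1, p.2) else s

def pvMx (v : Nat × Nat → Nat) (L : List (Nat × Nat)) : Nat := L.foldr (fun p m => max (v p) m) 0

def pvPairs (n m : Nat) : List (Nat × Nat) := (List.range n).flatMap fun i => (List.range m).map fun j => (i, j)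

theorem lcp_nil_right (a : List Char) : lcp a [] = 0 := by cases a <;> rfl

theorem lcp_nil_left (b : List Char) : lcp [] b = 0 := by cases b <;> rfl

theorem lcp_le_left : ∀ a b : List Char, lcp a b ≤ a.length
  | [], b => by rw [lcp_nil_left]; simp
  | _ :: _, [] => by rw [lcp_nil_right]; simp
  | a :: as, b :: bs => by
      show (if a = b then lcp as bs + 1 else 0) ≤ (a :: as).length
      split
      · have := lcp_le_left as bs; simpa using this
      · simp

theorem getD_eq_getElem_ch (l : List Char) (i : Nat) (h : i < l.length) : l.getD i ' ' = l[i] := by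
  rw [List.getD_eq_getElem?_getD, List.getElem?_eq_getElem h]; rfl

theorem vl_cons (l1 l2 : List Char) (i j : Nat) (hi : i < l1.length) (hj : j < l2.length)
    (h : l1[i] = l2[j]) : vl l1 l2 (i, j) = vl l1 l2 (i + 1, j + 1) + 1 := by
  unfold vl
  rw [List.drop_eq_getElem_cons hi, List.drop_eq_getElem_cons hj]
  show (if l1[i] = l2[j] then lcp (l1.drop (i+1)) (l2.drop (j+1)) + 1 else 0) = _
  rw [if_pos h]

theorem vl_zero (l1 l2 : List Char) (i j : Nat)
    (h : ¬(i < l1.length ∧ j < l2.length ∧ l1.getD i ' ' = l2.getD j ' ')) :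
    vl l1 l2 (i, j) = 0 := by
  unfold vl
  by_cases hi : i < l1.length
  · by_cases hj : j < l2.length
    · rw [List.drop_eq_getElem_cons hi, List.drop_eq_getElem_cons hj]
      have hne : ¬ l1[i] = l2[j] := by
        intro he; exact h ⟨hi, hj, by rw [getD_eq_getElem_ch _ _ hi, getD_eq_getElem_ch _ _ hj]; exact he⟩
      show (if l1[i] = l2[j] then _ else 0) = 0
      rw [if_neg hne]
    · rw [List.drop_eq_nil_of_le (by omega : l2.length ≤ j), lcp_nil_right]
  · rw [List.drop_eq_nil_of_le (by omega : l1.length ≤ i), lcp_nil_left]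

theorem vl_le (l1 l2 : List Char) (p : Nat × Nat) : vl l1 l2 p ≤ (l1.drop p.1).length :=
  lcp_le_left _ _

theorem extLen_eq (l1 l2 : List Char) (i j k : Nat) :
    extLen l1 l2 i j k = k + vl l1 l2 (i + k, j + k) := by
  have H : ∀ n, ∀ k, l1.length - (i + k) ≤ n →
      extLen l1 l2 i j k = k + vl l1 l2 (i + k, j + k) := by
    intro n
    induction n with
    | zero =>
      intro k hk
      rw [extLen]
      split
      · next h => omega
      · next h => rw [vl_zero _ _ _ _ h]; omega
    | succ n ih =>
      intro k hk
      rw [extLen]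
      split
      · next h =>
        rw [ih (k + 1) (by omega)]
        have e1 : i + (k + 1) = (i + k) + 1 := by omega
        have e2 : j + (k + 1) = (j + k) + 1 := by omega
        rw [e1, e2]
        rw [vl_cons l1 l2 (i + k) (j + k) h.1 h.2.1
          (by rw [← getD_eq_getElem_ch _ _ h.1, ← getD_eq_getElem_ch _ _ h.2.1]; exact h.2.2)]
        omega
      · next h => rw [vl_zero _ _ _ _ h]; omega
  exact H (l1.length - (i + k)) k le_rfl

theorem extLen_zero (l1 l2 : List Char) (i j : Nat) : extLen l1 l2 i j 0 = vl l1 l2 (i, j) := by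
  rw [extLen_eq]; simp

theorem pvMx_cons (v : Nat × Nat → Nat) (p : Nat × Nat) (L : List (Nat × Nat)) :
    pvMx v (p :: L) = max (v p) (pvMx v L) := rfl

theorem foldA_fst (v : Nat × Nat → Nat) :
    ∀ (L : List (Nat × Nat)) (s : Nat × Nat × Nat),
      (L.foldl (pvStepA v) s).1 = max s.1 (pvMx v L) := by
  intro L
  induction L with
  | nil => intro s; simp [pvMx]
  | cons p L ih =>
    intro s
    rw [List.foldl_cons, ih, pvMx_cons]
    by_cases h : s.1 < v p <;> simp [pvStepA, h] <;> omega

theorem foldA_stay (v : Nat × Nat → Nat) :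
    ∀ (L : List (Nat × Nat)) (s : Nat × Nat × Nat),
      pvMx v L ≤ s.1 → L.foldl (pvStepA v) s = s := by
  intro L
  induction L with
  | nil => intro s _; rfl
  | cons p L ih =>
    intro s hs
    rw [pvMx_cons] at hs
    rw [List.foldl_cons]
    have : pvStepA v s p = s := if_neg (by omega)
    rw [this]
    exact ih s (by omega)

theorem foldA_irrel (v : Nat × Nat → Nat) :
    ∀ (L : List (Nat × Nat)) (s t : Nat × Nat × Nat),
      s.1 < pvMx v L → t.1 < pvMx v L →
      L.foldl (pvStepA v) s = L.foldl (pvStepA v) t := by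
  intro L
  induction L with
  | nil => intro s t hs _; simp [pvMx] at hs
  | cons p L ih =>
    intro s t hs ht
    rw [pvMx_cons] at hs ht
    rw [List.foldl_cons, List.foldl_cons]
    by_cases h1 : s.1 < v p <;> by_cases h2 : t.1 < v p
    · rw [show pvStepA v s p = (v p, p.1, p.2) from if_pos h1,
        show pvStepA v t p = (v p, p.1, p.2) from if_pos h2]
    · rw [show pvStepA v s p = (v p, p.1, p.2) from if_pos h1,
        show pvStepA v t p = t from if_neg h2]
      exact ih (v p, p.1, p.2) t (by simp; omega) (by omega)
    · rw [show pvStepA v s p = s from if_neg h1,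
        show pvStepA v t p = (v p, p.1, p.2) from if_pos h2]
      exact ih s (v p, p.1, p.2) (by omega) (by simp; omega)
    · rw [show pvStepA v s p = s from if_neg h1,
        show pvStepA v t p = t from if_neg h2]
      exact ih s t (by omega) (by omega)

-- the tie-break bridge: forward strict-'>' fold = backward '≥'-on-positives fold
theorem main_AB (v : Nat × Nat → Nat) :
    ∀ L : List (Nat × Nat),
      L.foldl (pvStepA v) (0, 0, 0) = L.foldr (fun p s => pvStepB v s p) (0, 0, 0) := by
  intro L
  induction L with
  | nil => rfl
  | cons p L ih =>
    rw [List.foldl_cons, List.foldr_cons, ← ih]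
    have hr : (L.foldl (pvStepA v) (0, 0, 0)).1 = pvMx v L := by
      rw [foldA_fst]; simp
    by_cases hp : 1 ≤ v p
    · have hstepA : pvStepA v (0, 0, 0) p = (v p, p.1, p.2) := if_pos (by simp; omega)
      rw [hstepA]
      by_cases hm : pvMx v L ≤ v p
      · rw [foldA_stay v L _ (by simp; omega)]
        unfold pvStepB
        rw [if_pos ⟨hp, by omega⟩]
      · rw [foldA_irrel v L (v p, p.1, p.2) (0, 0, 0) (by simp; omega) (by simp; omega)]
        unfold pvStepB
        rw [if_neg (by rw [hr]; omega)]
    · have h0 : v p = 0 := by omega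
      have hstepA : pvStepA v (0, 0, 0) p = (0, 0, 0) := if_neg (by simp; omega)
      rw [hstepA]
      unfold pvStepB
      rw [if_neg (by omega)]

theorem foldl_flatMap' {β σ : Type} (g : Nat → List σ) (f : β → σ → β) :
    ∀ (L : List Nat) (b : β),
      (L.flatMap g).foldl f b = L.foldl (fun s i => (g i).foldl f s) b := by
  intro L
  induction L with
  | nil => intro b; rfl
  | cons x xs ih => intro b; simp only [List.flatMap_cons, List.foldl_append, List.foldl_cons, ih]

theorem foldl_pairs {β : Type} (f : β → Nat × Nat → β) (n m : Nat) (b : β) :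
    (List.range n).foldl (fun s i => (List.range m).foldl (fun s' j => f s' (i, j)) s) b
      = (pvPairs n m).foldl f b := by
  unfold pvPairs
  rw [foldl_flatMap']
  congr 1
  funext s i
  rw [List.foldl_map]

theorem foldl_congr' {β σ : Type} (f g : β → σ → β) :
    ∀ (L : List σ) (b : β), (∀ s, ∀ x ∈ L, f s x = g s x) → L.foldl f b = L.foldl g b := by
  intro L
  induction L with
  | nil => intro b _; rfl
  | cons x xs ih =>
    intro b h
    rw [List.foldl_cons, List.foldl_cons, h b x List.mem_cons_self]
    exact ih _ fun s y hy => h s y (List.mem_cons_of_mem _ hy)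

theorem foldl_prod {β γ σ : Type} (fb : β → σ → β) (fc : γ → σ → γ) :
    ∀ (L : List σ) (b : β) (c : γ),
      L.foldl (fun s x => (fb s.1 x, fc s.2 x)) (b, c) = (L.foldl fb b, L.foldl fc c) := by
  intro L
  induction L with
  | nil => intro b c; rfl
  | cons x xs ih => intro b c; rw [List.foldl_cons, List.foldl_cons, List.foldl_cons]; exact ih _ _

-- concrete A fold versus the abstract pvStepA fold
def mapA (l1 : List Char) (r : Nat × Nat × Nat) : List Char × Nat × Nat :=
  ((l1.drop r.2.1).take r.1, r.2.1, r.2.2)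

theorem concA (l1 l2 : List Char) :
    ∀ (L : List (Nat × Nat)) (a : Nat × Nat × Nat), a.1 ≤ (l1.drop a.2.1).length →
      L.foldl (fun st p => if st.1.length < vl l1 l2 p then
          ((l1.drop p.1).take (vl l1 l2 p), p.1, p.2) else st) (mapA l1 a)
        = mapA l1 (L.foldl (pvStepA (vl l1 l2)) a)
      ∧ (L.foldl (pvStepA (vl l1 l2)) a).1 ≤ (l1.drop (L.foldl (pvStepA (vl l1 l2)) a).2.1).length := by
  intro L
  induction L with
  | nil => intro a ha; exact ⟨rfl, ha⟩
  | cons p L ih =>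
    intro a ha
    have ha' : a.1 ≤ l1.length - a.2.1 := by simpa using ha
    have hlen : (mapA l1 a).1.length = a.1 := by
      simp [mapA]; omega
    rw [List.foldl_cons, List.foldl_cons]
    by_cases h : a.1 < vl l1 l2 p
    · rw [if_pos (by rw [hlen]; exact h)]
      rw [show pvStepA (vl l1 l2) a p = (vl l1 l2 p, p.1, p.2) from if_pos h]
      exact ih (vl l1 l2 p, p.1, p.2) (vl_le l1 l2 p)
    · rw [if_neg (by rw [hlen]; exact h)]
      rw [show pvStepA (vl l1 l2) a p = a from if_neg h]
      exact ih a ha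

-- the DP row invariant: r is the table row for position i
def rowP (l1 l2 : List Char) (i : Nat) (r : List Nat) : Prop :=
  r.length = l2.length + 1 ∧ ∀ j, j ≤ l2.length → r.getD j 0 = vl l1 l2 (i, j)

theorem getD_set' (l : List Nat) (i j a : Nat) :
    (l.set i a).getD j 0 = if i = j ∧ i < l.length then a else l.getD j 0 := by
  simp only [List.getD_eq_getElem?_getD, List.getElem?_set]
  split_ifs <;> simp_all
  omega

theorem getD_replicate' (n j : Nat) : (List.replicate n (0:Nat)).getD j 0 = 0 := by
  rw [List.getD_eq_getElem?_getD, List.getElem?_replicate]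
  split <;> rfl

theorem cur_fill (l1 l2 : List Char) (i : Nat) (nxt : List Nat) :
    ∀ (js : List Nat), (∀ j ∈ js, j < l2.length) → ∀ (c : List Nat), c.length = l2.length + 1 →
      (js.foldl (fun c j => if l1.getD i ' ' = l2.getD j ' '
          then c.set j (nxt.getD (j + 1) 0 + 1) else c) c).length = l2.length + 1
      ∧ ∀ j', (js.foldl (fun c j => if l1.getD i ' ' = l2.getD j ' '
          then c.set j (nxt.getD (j + 1) 0 + 1) else c) c).getD j' 0
        = if j' ∈ js ∧ l1.getD i ' ' = l2.getD j' ' ' then nxt.getD (j' + 1) 0 + 1 else c.getD j' 0 := by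
  intro js
  induction js with
  | nil => intro _ c hc; exact ⟨hc, fun j' => by simp⟩
  | cons j js ih =>
    intro hjs c hc
    rw [List.foldl_cons]
    have hc' : (if l1.getD i ' ' = l2.getD j ' ' then c.set j (nxt.getD (j + 1) 0 + 1) else c).length
        = l2.length + 1 := by split <;> simp [hc]
    obtain ⟨hlen, hval⟩ := ih (fun x hx => hjs x (List.mem_cons_of_mem _ hx)) _ hc'
    refine ⟨hlen, fun j' => ?_⟩
    rw [hval j']
    have hjlt : j < l2.length := hjs j List.mem_cons_self
    by_cases hch : l1.getD i ' ' = l2.getD j' ' '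
    · by_cases hmem : j' ∈ js
      · rw [if_pos (show j' ∈ js ∧ l1.getD i ' ' = l2.getD j' ' ' from ⟨hmem, hch⟩),
          if_pos (show j' ∈ j :: js ∧ l1.getD i ' ' = l2.getD j' ' '
            from ⟨List.mem_cons_of_mem _ hmem, hch⟩)]
      · by_cases hjj : j' = j
        · subst hjj
          rw [if_neg (show ¬(j' ∈ js ∧ l1.getD i ' ' = l2.getD j' ' ') from fun h => hmem h.1),
            if_pos hch, getD_set',
            if_pos (show j' = j' ∧ j' < c.length from ⟨rfl, by omega⟩),
            if_pos (show j' ∈ j' :: js ∧ l1.getD i ' ' = l2.getD j' ' '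
              from ⟨List.mem_cons_self, hch⟩)]
        · rw [if_neg (show ¬(j' ∈ js ∧ l1.getD i ' ' = l2.getD j' ' ') from fun h => hmem h.1),
            if_neg (show ¬(j' ∈ j :: js ∧ l1.getD i ' ' = l2.getD j' ' ')
              from fun h => (List.mem_cons.mp h.1).elim hjj hmem)]
          by_cases hEj : l1.getD i ' ' = l2.getD j ' '
          · rw [if_pos hEj, getD_set',
              if_neg (show ¬(j = j' ∧ j < c.length) from fun h => hjj h.1.symm)]
          · rw [if_neg hEj]
    · rw [if_neg (show ¬(j' ∈ js ∧ l1.getD i ' ' = l2.getD j' ' ') from fun h => hch h.2),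
        if_neg (show ¬(j' ∈ j :: js ∧ l1.getD i ' ' = l2.getD j' ' ') from fun h => hch h.2)]
      by_cases hEj : l1.getD i ' ' = l2.getD j ' '
      · rw [if_pos hEj, getD_set',
          if_neg (show ¬(j = j' ∧ j < c.length) from fun h => hch (h.1 ▸ hEj))]
      · rw [if_neg hEj]

-- B's inner loop: best-component is a pvStepB fold, cur-component becomes row i
theorem innerB (l1 l2 : List Char) (i : Nat) (hi : i < l1.length) (nxt : List Nat)
    (hn : rowP l1 l2 (i + 1) nxt) (b : Nat × Nat × Nat) :
    (List.range l2.length).reverse.foldl (fun st2 j =>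
        if l1.getD i ' ' = l2.getD j ' ' then
          ((if st2.1.1 ≤ nxt.getD (j + 1) 0 + 1 then (nxt.getD (j + 1) 0 + 1, i, j) else st2.1),
            st2.2.set j (nxt.getD (j + 1) 0 + 1))
        else st2)
      (b, List.replicate (l2.length + 1) 0)
    = (((List.range l2.length).reverse.map (fun j => (i, j))).foldl (pvStepB (vl l1 l2)) b,
        (List.range l2.length).reverse.foldl (fun c j => if l1.getD i ' ' = l2.getD j ' '
          then c.set j (nxt.getD (j + 1) 0 + 1) else c) (List.replicate (l2.length + 1) 0))
    ∧ rowP l1 l2 i ((List.range l2.length).reverse.foldl (fun c j => if l1.getD i ' ' = l2.getD j ' '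
          then c.set j (nxt.getD (j + 1) 0 + 1) else c) (List.replicate (l2.length + 1) 0)) := by
  have hmem : ∀ j ∈ (List.range l2.length).reverse, j < l2.length := by
    intro j hj; rw [List.mem_reverse, List.mem_range] at hj; exact hj
  constructor
  · -- split the product fold, then identify the best component with pvStepB
    have e1 : (List.range l2.length).reverse.foldl (fun st2 j =>
        if l1.getD i ' ' = l2.getD j ' ' then
          ((if st2.1.1 ≤ nxt.getD (j + 1) 0 + 1 then (nxt.getD (j + 1) 0 + 1, i, j) else st2.1),
            st2.2.set j (nxt.getD (j + 1) 0 + 1))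
        else st2)
      (b, List.replicate (l2.length + 1) 0)
      = ((List.range l2.length).reverse.foldl (fun b1 j =>
            if l1.getD i ' ' = l2.getD j ' ' then
              (if b1.1 ≤ nxt.getD (j + 1) 0 + 1 then (nxt.getD (j + 1) 0 + 1, i, j) else b1)
            else b1) b,
          (List.range l2.length).reverse.foldl (fun c j => if l1.getD i ' ' = l2.getD j ' '
            then c.set j (nxt.getD (j + 1) 0 + 1) else c) (List.replicate (l2.length + 1) 0)) := by
      refine Eq.trans (foldl_congr' _ (fun s j =>
          ((fun b1 j => if l1.getD i ' ' = l2.getD j ' ' then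
              (if b1.1 ≤ nxt.getD (j + 1) 0 + 1 then (nxt.getD (j + 1) 0 + 1, i, j) else b1)
            else b1) s.1 j,
           (fun c j => if l1.getD i ' ' = l2.getD j ' '
              then c.set j (nxt.getD (j + 1) 0 + 1) else c) s.2 j))
        _ _ ?_) (foldl_prod (fun b1 j =>
            if l1.getD i ' ' = l2.getD j ' ' then
              (if b1.1 ≤ nxt.getD (j + 1) 0 + 1 then (nxt.getD (j + 1) 0 + 1, i, j) else b1)
            else b1) (fun c j => if l1.getD i ' ' = l2.getD j ' '
            then c.set j (nxt.getD (j + 1) 0 + 1) else c)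
          (List.range l2.length).reverse b (List.replicate (l2.length + 1) 0))
      intro s x _
      by_cases h : l1.getD i ' ' = l2.getD x ' '
      · simp only [if_pos h]
      · simp only [if_neg h]
    rw [e1]
    congr 1
    rw [List.foldl_map]
    apply foldl_congr'
    intro s j hj
    have hjlt : j < l2.length := hmem j hj
    by_cases hch : l1.getD i ' ' = l2.getD j ' '
    · have hche : l1[i] = l2[j] := by
        rw [← getD_eq_getElem_ch _ _ hi, ← getD_eq_getElem_ch _ _ hjlt]; exact hch
      have hv : vl l1 l2 (i, j) = nxt.getD (j + 1) 0 + 1 := by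
        rw [vl_cons l1 l2 i j hi hjlt hche, hn.2 (j + 1) (by omega)]
      rw [if_pos hch]
      unfold pvStepB
      rw [hv]
      by_cases hle : s.1 ≤ nxt.getD (j + 1) 0 + 1
      · rw [if_pos hle, if_pos ⟨by omega, hle⟩]
      · rw [if_neg hle, if_neg (by intro h; exact hle h.2)]
    · have hv : vl l1 l2 (i, j) = 0 := vl_zero _ _ _ _ (by intro h; exact hch h.2.2)
      rw [if_neg hch]
      unfold pvStepB
      rw [if_neg (by rw [hv]; intro h; omega)]
  · obtain ⟨hlen, hval⟩ := cur_fill l1 l2 i nxt (List.range l2.length).reverse hmem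
      (List.replicate (l2.length + 1) 0) (by simp)
    refine ⟨hlen, fun j hj => ?_⟩
    rw [hval j]
    by_cases hjl : j < l2.length
    · by_cases hch : l1.getD i ' ' = l2.getD j ' '
      · rw [if_pos ⟨by rw [List.mem_reverse, List.mem_range]; exact hjl, hch⟩]
        have hche : l1[i] = l2[j] := by
          rw [← getD_eq_getElem_ch _ _ hi, ← getD_eq_getElem_ch _ _ hjl]; exact hch
        rw [vl_cons l1 l2 i j hi hjl hche, hn.2 (j + 1) (by omega)]
      · rw [if_neg (by intro h; exact hch h.2), getD_replicate',
          vl_zero _ _ _ _ (by intro h; exact hch h.2.2)]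
    · rw [if_neg (by intro h; rw [List.mem_reverse, List.mem_range] at h; exact hjl h.1),
        getD_replicate', vl_zero _ _ _ _ (by intro h; exact hjl h.2.1)]

-- B's outer loop equals the backward pvStepB fold over all cells
theorem outerB (l1 l2 : List Char) :
    ∀ (m : Nat), m ≤ l1.length → ∀ (b : Nat × Nat × Nat) (nxt : List Nat), rowP l1 l2 m nxt →
      ((List.range m).reverse.foldl (fun st i =>
          (List.range l2.length).reverse.foldl (fun st2 j =>
              if l1.getD i ' ' = l2.getD j ' ' then
                ((if st2.1.1 ≤ st.2.getD (j + 1) 0 + 1 then (st.2.getD (j + 1) 0 + 1, i, j) else st2.1),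
                  st2.2.set j (st.2.getD (j + 1) 0 + 1))
              else st2)
            (st.1, List.replicate (l2.length + 1) 0))
        (b, nxt)).1
      = ((pvPairs m l2.length).reverse).foldl (pvStepB (vl l1 l2)) b := by
  intro m
  induction m with
  | zero => intro _ b nxt _; rfl
  | succ m ih =>
    intro hm b nxt hn
    have hrev : (List.range (m + 1)).reverse = m :: (List.range m).reverse := by
      rw [List.range_succ, List.reverse_append]; rfl
    rw [hrev, List.foldl_cons]
    obtain ⟨heq, hrow⟩ := innerB l1 l2 m (by omega) nxt hn b
    rw [heq]
    rw [ih (by omega) _ _ hrow]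
    have hpair : (pvPairs (m + 1) l2.length).reverse
        = ((List.range l2.length).map (fun j => (m, j))).reverse ++ (pvPairs m l2.length).reverse := by
      unfold pvPairs
      rw [List.range_succ, List.flatMap_append, List.reverse_append]
      simp [List.flatMap_cons]
    rw [hpair, List.foldl_append]
    congr 1
    rw [List.map_reverse]

theorem rowP_init (l1 l2 : List Char) :
    rowP l1 l2 l1.length (List.replicate (l2.length + 1) 0) := by
  refine ⟨by simp, fun j _ => ?_⟩
  rw [getD_replicate', vl_zero _ _ _ _ (by intro h; omega)]

-- ===== VERDICT (by name: the statement is the Claim_ definition above) =====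
theorem merge_sgrna_spec : Claim_equal_merge_sgrna := by
  intro seq1 seq2 _
  unfold Spec_merge_sgrna merge_sgrna merge_sgrna_alt
  by_cases h1 : seq1 = "-" <;> by_cases h2 : seq2 = "-" <;>
    simp only [h1, h2, ne_eq, not_true_eq_false, not_false_eq_true, and_true, and_false,
      and_self, if_true, if_false]
  -- main branch: both sequences present
  set l1 := seq1.toList with hl1
  set l2 := seq2.toList with hl2
  set v := vl l1 l2 with hv
  set P := pvPairs l1.length l2.length with hP
  set r := P.foldl (pvStepA v) (0, 0, 0) with hrdef
  -- A's fold equals mapA of the abstract forward fold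
  have hstepA : (List.range l1.length).foldl (fun st i =>
      (List.range l2.length).foldl (fun st j =>
          let k := extLen l1 l2 i j 0
          if st.1.length < k then ((l1.drop i).take k, i, j) else st) st)
    (([] : List Char), 0, 0)
    = mapA l1 r ∧ r.1 ≤ (l1.drop r.2.1).length := by
    have e1 : (List.range l1.length).foldl (fun st i =>
        (List.range l2.length).foldl (fun st j =>
            let k := extLen l1 l2 i j 0
            if st.1.length < k then ((l1.drop i).take k, i, j) else st) st)
      (([] : List Char), 0, 0)
      = P.foldl (fun st p => if st.1.length < v p then
          ((l1.drop p.1).take (v p), p.1, p.2) else st) (([] : List Char), 0, 0) := by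
      rw [hP, ← foldl_pairs (f := fun st p => if st.1.length < v p then
          ((l1.drop p.1).take (v p), p.1, p.2) else st)]
      apply foldl_congr'
      intro s i _
      apply foldl_congr'
      intro s' j _
      simp only [extLen_zero, hv]
    rw [e1]
    have := concA l1 l2 P (0, 0, 0) (by simp)
    rw [← hrdef] at this
    exact ⟨by rw [← this.1]; rfl, this.2⟩
  -- B's fold's best component equals the same abstract result r
  have hstepB : ((List.range l1.length).reverse.foldl (fun st i =>
      (List.range l2.length).reverse.foldl (fun st2 j =>
          if l1.getD i ' ' = l2.getD j ' ' then
            let k := st.2.getD (j + 1) 0 + 1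
            ((if k ≥ st2.1.1 then (k, i, j) else st2.1), st2.2.set j k)
          else st2)
        (st.1, List.replicate (l2.length + 1) 0))
    (((0, 0, 0) : Nat × Nat × Nat), List.replicate (l2.length + 1) 0)).1 = r := by
    have e2 : (pvPairs l1.length l2.length).reverse.foldl (pvStepB (vl l1 l2)) (0, 0, 0) = r := by
      rw [List.foldl_reverse, ← main_AB, hrdef, hv, hP]
    have h := outerB l1 l2 l1.length le_rfl (0, 0, 0) _ (rowP_init l1 l2)
    rw [e2] at h
    exact h
  rw [hstepA.1]
  rw [hstepB]
  have hr1 : r.1 ≤ l1.length - r.2.1 := by simpa using hstepA.2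
  have hlen : ((l1.drop r.2.1).take r.1).length = r.1 := by simp; omega
  by_cases hz : r.1 = 0
  · rw [if_neg (by simp [mapA, hz]), if_neg (by simp [hz])]
  · have hne : (mapA l1 r).1 ≠ [] := by
      simp only [mapA]
      intro hcontra
      have hl := congrArg List.length hcontra
      rw [hlen] at hl
      simp at hl
      exact hz hl
    rw [if_pos hne, if_pos hz]
    simp only [mapA]
    rw [hlen]
    congr 1
    rw [List.take_add]
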